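-- pv_equiv track=rewrite | github.com/glormph/msstitch | app/preparation/mzidtsv/proteingrouping.py | get_masters
-- ===== SOURCE A (Python) =====
-- def get_masters(ppgraph):
--     masters = []
--     for protein, peps in ppgraph.items():
--         ismaster = True
--         peps = set(peps)
--         for subprotein, subpeps in ppgraph.items():
--             if protein == subprotein:
--                 continue
--             if peps.issubset(subpeps):
--                 ismaster = False
--                 break
--         if ismaster:
--             masters.append(protein)
--     return masters
-- ===== SOURCE B (Python) =====
-- def get_masters(ppgraph):
--     # Inverted index: peptide -> set of proteins containing it.
--     index = {}
--     for prot, peps in ppgraph.items():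
--         for pep in peps:
--             index.setdefault(pep, set()).add(prot)
--     keys = list(ppgraph)
--     masters = []
--     for prot, peps in ppgraph.items():
--         # candidates = proteins whose peptide set is a superset of peps
--         cand = keys
--         for pep in peps:
--             cand = [q for q in cand if q in index[pep]]
--         if len(cand) == 1:  # only prot itself -> master
--             masters.append(prot)
--     return masters
-- ===== Notes on version B (the rewrite author's own statement) =====
-- stated objective: faster
-- what changed: Replaces the all-pairs subset test (for each protein, scan every other protein and check peptide-set inclusion) by an inverted peptide-to-proteins index built once; a protein is a master iff intersecting the posting lists of its peptides leaves only the protein itself.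
import Mathlib
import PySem

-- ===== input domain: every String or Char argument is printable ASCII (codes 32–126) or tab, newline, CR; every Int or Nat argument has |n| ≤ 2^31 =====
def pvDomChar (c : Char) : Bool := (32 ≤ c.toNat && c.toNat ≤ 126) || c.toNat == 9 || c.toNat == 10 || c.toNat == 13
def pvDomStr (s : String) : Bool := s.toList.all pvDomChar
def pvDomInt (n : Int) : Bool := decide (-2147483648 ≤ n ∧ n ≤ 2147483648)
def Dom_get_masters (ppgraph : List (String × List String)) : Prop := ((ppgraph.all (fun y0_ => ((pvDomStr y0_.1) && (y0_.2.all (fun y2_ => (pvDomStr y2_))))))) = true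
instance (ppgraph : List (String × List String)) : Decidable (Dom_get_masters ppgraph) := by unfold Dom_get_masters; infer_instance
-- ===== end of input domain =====

-- B replaces A's all-pairs peptide-subset scan by an inverted peptide→proteins index
-- (master iff intersecting the posting lists of its peptides leaves only the protein itself): asymptotically faster on sparse data.
-- The input dict is modelled as an association list; both ports normalise it with PySem.Dict.ofList (Python dict construction).

-- ===== PORT A =====
-- inner loop of A over ppgraph.items() with break: returns False (ismaster) on the first
-- other protein whose peptides are a superset of peps
def pvInnerA (protein : String) (peps : PySem.Set String) : List (String × List String) → Bool
  | [] => true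
  | (sub, subpeps) :: rest =>
    if protein == sub then pvInnerA protein peps rest
    else if PySem.Set.issubset peps subpeps then false
    else pvInnerA protein peps rest

def get_masters (ppgraph : List (String × List String)) : List String :=
  let g := (PySem.Dict.ofList ppgraph).items
  g.foldl (fun masters pp =>
    if pvInnerA pp.1 (PySem.Set.ofList pp.2) g then masters ++ [pp.1] else masters) []

-- ===== PORT B =====
-- index.setdefault(pep, set()).add(prot)  ==  index[pep] = index.get(pep, set()) ∪ {prot}  (Dict.modify)
def pvIndexB (g : List (String × List String)) : PySem.Dict String (PySem.Set String) :=
  g.foldl (fun d pp =>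
    pp.2.foldl (fun d pep => d.modify pep [] (fun s => PySem.Set.add s pp.1)) d)
    PySem.Dict.empty

def pvCandB (index : PySem.Dict String (PySem.Set String)) (keys : List String)
    (peps : List String) : List String :=
  peps.foldl (fun cand pep => cand.filter (fun q => PySem.Set.contains (index.getD pep []) q)) keys

def get_masters_alt (ppgraph : List (String × List String)) : List String :=
  let g := (PySem.Dict.ofList ppgraph).items
  let index := pvIndexB g
  let keys := g.map Prod.fst
  g.foldl (fun masters pp =>
    if (pvCandB index keys pp.2).length == 1 then masters ++ [pp.1] else masters) []

-- ===== PRECONDITION & SPEC =====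
def Spec_get_masters (ppgraph : List (String × List String)) (out : List String) : Prop := out = get_masters_alt ppgraph
instance (ppgraph : List (String × List String)) (out : List String) : Decidable (Spec_get_masters ppgraph out) := by unfold Spec_get_masters; infer_instance

-- ===== CLAIM (what is proved, stated in full; the proofs are below) =====
def Claim_equal_get_masters : Prop := ∀ (ppgraph : List (String × List String)), Dom_get_masters ppgraph → Spec_get_masters ppgraph (get_masters ppgraph)

-- ===== LEMMAS AND PROOFS =====

-- membership in a posting list after the inner index-building loop over one protein's peptides
theorem pvIndexB_inner_mem (prot : String) (peps : List String)
    (d : PySem.Dict String (PySem.Set String)) (q pep : String) :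
    q ∈ (peps.foldl (fun d pep' => d.modify pep' [] (fun s => PySem.Set.add s prot)) d).getD pep []
      ↔ q ∈ d.getD pep [] ∨ (q = prot ∧ pep ∈ peps) := by
  induction peps generalizing d with
  | nil => simp
  | cons p ps ih =>
    simp only [List.foldl_cons, ih, PySem.Dict.getD_modify, List.mem_cons]
    split_ifs with h
    · subst h; simp [PySem.Set.mem_add]; tauto
    · constructor
      · rintro (hq | hq) <;> tauto
      · rintro (hq | ⟨hq, hp | hp⟩)
        · tauto
        · exact absurd hp h
        · tauto

theorem pvIndexB_mem (g : List (String × List String)) (q pep : String) :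
    q ∈ (pvIndexB g).getD pep [] ↔ ∃ pp ∈ g, pp.1 = q ∧ pep ∈ pp.2 := by
  unfold pvIndexB
  suffices h : ∀ (d : PySem.Dict String (PySem.Set String)), q ∈ (g.foldl (fun d pp =>
      pp.2.foldl (fun d pep' => d.modify pep' [] (fun s => PySem.Set.add s pp.1)) d) d).getD pep []
      ↔ q ∈ d.getD pep [] ∨ ∃ pp ∈ g, pp.1 = q ∧ pep ∈ pp.2 by
    simpa using h PySem.Dict.empty
  induction g with
  | nil => simp
  | cons hd tl ih =>
    intro d
    simp only [List.foldl_cons, ih, pvIndexB_inner_mem, List.mem_cons]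
    constructor
    · rintro (⟨hq | ⟨rfl, hp⟩⟩ | ⟨pp, hpp, h1, h2⟩)
      · tauto
      · exact Or.inr ⟨hd, Or.inl rfl, rfl, hp⟩
      · exact Or.inr ⟨pp, Or.inr hpp, h1, h2⟩
    · rintro (hq | ⟨pp, hpp | hpp, h1, h2⟩)
      · tauto
      · subst hpp; exact Or.inl (Or.inr ⟨h1.symm, h2⟩)
      · exact Or.inr ⟨pp, hpp, h1, h2⟩

theorem pvCandB_mem (index : PySem.Dict String (PySem.Set String)) (keys peps : List String)
    (q : String) :
    q ∈ pvCandB index keys peps ↔ q ∈ keys ∧ ∀ pep ∈ peps, q ∈ index.getD pep [] := by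
  unfold pvCandB
  induction peps generalizing keys with
  | nil => simp
  | cons p ps ih =>
    simp only [List.foldl_cons, ih, List.mem_filter, PySem.Set.contains_iff, List.mem_cons]
    constructor
    · rintro ⟨⟨hk, hp⟩, hall⟩
      exact ⟨hk, fun pep h => h.elim (fun h => h ▸ hp) (hall pep)⟩
    · rintro ⟨hk, hall⟩
      exact ⟨⟨hk, hall p (Or.inl rfl)⟩, fun pep h => hall pep (Or.inr h)⟩

theorem pvCandB_sublist (index : PySem.Dict String (PySem.Set String)) (keys peps : List String) :
    (pvCandB index keys peps).Sublist keys := by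
  unfold pvCandB
  induction peps generalizing keys with
  | nil => simp
  | cons p ps ih =>
    exact (ih _).trans List.filter_sublist

-- A's inner loop (with break) decides "no other protein's peptides contain peps"
theorem pvInnerA_iff (protein : String) (peps : PySem.Set String)
    (l : List (String × List String)) :
    pvInnerA protein peps l = true
      ↔ ∀ pp ∈ l, pp.1 ≠ protein → ¬ (PySem.Set.issubset peps pp.2 = true) := by
  induction l with
  | nil => simp [pvInnerA]
  | cons hd tl ih =>
    obtain ⟨sub, subpeps⟩ := hd
    simp only [pvInnerA, List.mem_cons]
    split_ifs with h1 h2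
    · simp only [beq_iff_eq] at h1
      rw [ih]
      constructor
      · rintro h pp (rfl | hpp) <;> [simp [h1]; exact h pp hpp]
      · intro h pp hpp; exact h pp (Or.inr hpp)
    · simp only [beq_iff_eq] at h1
      constructor
      · intro h; cases h
      · intro h; exact absurd h2 (h (sub, subpeps) (Or.inl rfl) (fun he => h1 he.symm))
    · rw [ih]
      constructor
      · rintro h pp (rfl | hpp)
        · intro _; exact h2
        · exact h pp hpp
      · intro h pp hpp; exact h pp (Or.inr hpp)

-- nodup first components make the pair determined by its key
theorem pv_fst_inj {g : List (String × List String)}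
    (hnd : (g.map Prod.fst).Nodup) {pp pp' : String × List String}
    (h1 : pp ∈ g) (h2 : pp' ∈ g) (he : pp.1 = pp'.1) : pp = pp' := by
  induction g with
  | nil => cases h1
  | cons hd tl ih =>
    simp only [List.map_cons, List.nodup_cons, List.mem_map, not_exists] at hnd
    rcases List.mem_cons.mp h1 with h1' | h1' <;> rcases List.mem_cons.mp h2 with h2' | h2'
    · rw [h1', h2']
    · exact absurd ⟨h2', by rw [← he, h1']⟩ (hnd.1 pp')
    · exact absurd ⟨h1', by rw [he, h2']⟩ (hnd.1 pp)
    · exact ih hnd.2 h1' h2'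

-- the decisive per-protein fact: A's inner-loop verdict equals B's candidate count test
theorem pv_cond_eq (g : List (String × List String)) (hnd : (g.map Prod.fst).Nodup)
    (pp : String × List String) (hmem : pp ∈ g) :
    pvInnerA pp.1 (PySem.Set.ofList pp.2) g
      = ((pvCandB (pvIndexB g) (g.map Prod.fst) pp.2).length == 1) := by
  have hself : pp.1 ∈ pvCandB (pvIndexB g) (g.map Prod.fst) pp.2 := by
    rw [pvCandB_mem]
    exact ⟨List.mem_map_of_mem hmem, fun pep hp => (pvIndexB_mem g pp.1 pep).mpr ⟨pp, hmem, rfl, hp⟩⟩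
  have hnodupc : (pvCandB (pvIndexB g) (g.map Prod.fst) pp.2).Nodup :=
    (pvCandB_sublist _ _ _).nodup hnd
  rw [Bool.eq_iff_iff, pvInnerA_iff, beq_iff_eq]
  constructor
  · -- A master ⇒ every candidate is pp.1, so cand = [pp.1]
    intro h
    have hall : ∀ q ∈ pvCandB (pvIndexB g) (g.map Prod.fst) pp.2, q = pp.1 := by
      intro q hq
      rw [pvCandB_mem] at hq
      obtain ⟨hk, hsup⟩ := hq
      obtain ⟨pq, hpq, rfl⟩ := List.mem_map.mp hk
      by_contra hne
      refine h pq hpq hne ?_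
      rw [PySem.Set.issubset_iff]
      intro x hx
      rw [PySem.Set.mem_ofList] at hx
      obtain ⟨pp'', hpp'', h1, h2⟩ := (pvIndexB_mem g pq.1 x).mp (hsup x hx)
      exact (pv_fst_inj hnd hpp'' hpq h1) ▸ h2
    rcases hc : pvCandB (pvIndexB g) (g.map Prod.fst) pp.2 with _ | ⟨c, cs⟩
    · rw [hc] at hself; cases hself
    · rcases cs with _ | ⟨c', cs'⟩
      · simp
      · exfalso
        have h1 := hall c (hc ▸ List.mem_cons_self ..)
        have h2 := hall c' (hc ▸ List.mem_cons.mpr (Or.inr (List.mem_cons_self ..)))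
        rw [hc] at hnodupc
        simp [h1, h2] at hnodupc
  · -- |cand| = 1 ⇒ cand = [pp.1] ⇒ no other superset protein
    intro hlen pq hpq hne hsub
    have hq : pq.1 ∈ pvCandB (pvIndexB g) (g.map Prod.fst) pp.2 := by
      rw [pvCandB_mem]
      refine ⟨List.mem_map_of_mem hpq, fun pep hp => ?_⟩
      rw [PySem.Set.issubset_iff] at hsub
      exact (pvIndexB_mem g pq.1 pep).mpr
        ⟨pq, hpq, rfl, hsub pep ((PySem.Set.mem_ofList _ _).mpr hp)⟩
    rcases hc : pvCandB (pvIndexB g) (g.map Prod.fst) pp.2 with _ | ⟨c, cs⟩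
    · rw [hc] at hself; cases hself
    · rw [hc] at hlen hq hself
      have : cs = [] := List.length_eq_zero_iff.mp (by simpa using hlen)
      subst this
      simp only [List.mem_singleton] at hq hself
      exact hne (hq.trans hself.symm)

-- ===== VERDICT (by name: the statement is the Claim_ definition above) =====
theorem get_masters_spec : Claim_equal_get_masters := by
  intro ppgraph _
  unfold Spec_get_masters get_masters get_masters_alt
  have hnd : (((PySem.Dict.ofList ppgraph).items.map Prod.fst)).Nodup :=
    PySem.Dict.nodup_keys_ofList ppgraph
  apply PySem.List.foldl_congr_mem
  intro masters pp hmem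
  rw [pv_cond_eq _ hnd pp hmem]
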